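-- pv_equiv track=rewrite | github.com/Anderbone/CS917ComputingFoundations | assignment2/practical2.1.py | morse_all
-- ===== SOURCE A (Python) =====
-- import itertools
--
-- def guesslist(num):
--     guess = [''.join(i) for i in (itertools.product(['.', '-'], repeat=num))]
--     return guess
--
-- def morse_all(test):
--     xnum = len(test)
--     guess = guesslist(xnum)
--     all = []
--     for replace in guess:
--         possible = []
--         i = 0
--         for each in test:
--             each = replace[i] + each[1:]
--             possible.append(each)
--             i += 1
--         all.append(possible)
--     return all
-- ===== SOURCE B (Python) =====
-- def morse_all(test):
--     # Precompute the suffixes once, then build the combinations recursively,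
--     # '.' before '-', position 0 outermost (same order as itertools.product).
--     suffixes = [s[1:] for s in test]
--     results = []
--
--     def go(p, acc):
--         if p == len(suffixes):
--             results.append(list(acc))
--             return
--         for c in '.-':
--             go(p + 1, acc + [c + suffixes[p]])
--
--     go(0, [])
--     return results
-- ===== Notes on version B (the rewrite author's own statement) =====
-- stated objective: alternative
-- what changed: B replaces A's two-phase approach (materialize all 2^n combination strings with itertools.product + join, then re-split each by indexing) with a single recursion over precomputed suffixes that builds each result list directly, never constructing the combination strings.
import Mathlib
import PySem

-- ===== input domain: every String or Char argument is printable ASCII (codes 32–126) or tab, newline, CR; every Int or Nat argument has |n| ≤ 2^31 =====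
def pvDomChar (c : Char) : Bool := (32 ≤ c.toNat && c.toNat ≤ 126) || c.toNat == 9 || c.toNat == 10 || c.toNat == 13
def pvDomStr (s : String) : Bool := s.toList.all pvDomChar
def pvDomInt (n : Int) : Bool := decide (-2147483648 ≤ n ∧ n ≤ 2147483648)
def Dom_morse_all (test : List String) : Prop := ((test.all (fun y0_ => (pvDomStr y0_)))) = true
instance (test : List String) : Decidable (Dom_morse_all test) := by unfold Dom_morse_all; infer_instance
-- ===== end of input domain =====

-- B builds each result list directly by recursion over precomputed suffixes instead of
-- materializing all combination strings via itertools.product + join and re-indexing them ('alternative').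

-- ===== PORT A =====
-- exact port of Python '+' on str (Lean's String.append is opaque to the kernel)
def pyStrCat (a b : String) : String := String.ofList (a.toList ++ b.toList)

-- itertools.product(['.', '-'], repeat=num): first position varies slowest, '.' before '-'
def prodDotDash : Nat → List (List String)
  | 0 => [[]]
  | n + 1 => [".", "-"].flatMap (fun c => (prodDotDash n).map (fun t => c :: t))

def guesslist (num : Nat) : List String :=
  (prodDotDash num).map (fun t => PySem.Str.join "" t)

def morse_all (test : List String) : List (List String) :=
  let xnum := test.length
  let guess := guesslist xnum
  guess.foldl (fun all replace =>
    let p := test.foldl (fun (st : List String × Int) each =>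
      -- replace[i] : i is always in range here (len(replace) = len(test)); exact on reachable states
      let c := (PySem.Str.pyGet? replace st.2).getD ' '
      (st.1 ++ [pyStrCat (String.ofList [c]) (PySem.Str.slice each (some 1) none)], st.2 + 1))
      ([], (0 : Int))
    all ++ [p.1]) []

-- ===== PORT B =====
-- go(p, acc): recursion over the remaining suffixes, '.' before '-', appending one result at the base
def altGo (suffixes : List String) (acc : List String) : List (List String) :=
  match suffixes with
  | [] => [acc]
  | s :: rest =>
      (['.', '-'] : List Char).flatMap
        (fun c => altGo rest (acc ++ [pyStrCat (String.ofList [c]) s]))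

def morse_all_alt (test : List String) : List (List String) :=
  altGo (test.map (fun s => PySem.Str.slice s (some 1) none)) []

-- ===== PRECONDITION & SPEC =====
def Spec_morse_all (test : List String) (out : List (List String)) : Prop := out = morse_all_alt test
instance (test : List String) (out : List (List String)) : Decidable (Spec_morse_all test out) := by unfold Spec_morse_all; infer_instance

-- ===== CLAIM (what is proved, stated in full; the proofs are below) =====
def Claim_equal_morse_all : Prop := ∀ (test : List String), Dom_morse_all test → Spec_morse_all test (morse_all test)

-- ===== LEMMAS AND PROOFS =====

-- shorthand used only by the proofs
def gRep (c : Char) (each : String) : String :=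
  pyStrCat (String.ofList [c]) (PySem.Str.slice each (some 1) none)

theorem joinNilFlat (ls : List (List Char)) : PySem.Chars.join [] ls = ls.flatten := by
  induction ls with
  | nil => simp [PySem.Chars.join_nil]
  | cons a rest ih =>
    cases rest with
    | nil => simp [PySem.Chars.join_singleton]
    | cons b r => simp [PySem.Chars.join_cons_cons, ih]

theorem length_prod_chars {n : Nat} {t : List String} (ht : t ∈ prodDotDash n) :
    (t.map String.toList).flatten.length = n := by
  induction n generalizing t with
  | zero => simp [prodDotDash] at ht; simp [ht]
  | succ m ih =>
    simp only [prodDotDash, List.flatMap_cons, List.flatMap_nil, List.append_nil,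
      List.mem_append, List.mem_map] at ht
    rcases ht with ⟨t', ht', rfl⟩ | ⟨t', ht', rfl⟩ <;> simp [ih ht']

-- altGo with a nonempty accumulator is altGo from scratch with the accumulator prefixed
theorem altGo_acc (suf : List String) (acc : List String) :
    altGo suf acc = (altGo suf []).map (fun l => acc ++ l) := by
  induction suf generalizing acc with
  | nil => simp [altGo]
  | cons s rest ih =>
    simp only [altGo, List.flatMap_cons, List.flatMap_nil, List.append_nil, List.nil_append]
    rw [ih (acc ++ [pyStrCat (String.ofList ['.']) s]), ih (acc ++ [pyStrCat (String.ofList ['-']) s]),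
      ih [pyStrCat (String.ofList ['.']) s], ih [pyStrCat (String.ofList ['-']) s]]
    simp [List.map_map, Function.comp_def]

-- A's inner loop is a zipWith of the replacement characters against the suffixes
theorem inner_fold (ts : List String) (replace : String) (acc : List String) (k : Nat)
    (h : k + ts.length ≤ replace.toList.length) :
    (ts.foldl (fun (st : List String × Int) each =>
        (st.1 ++ [pyStrCat (String.ofList [(PySem.Str.pyGet? replace st.2).getD ' '])
                    (PySem.Str.slice each (some 1) none)], st.2 + 1))
        (acc, (k : Int))).1
      = acc ++ List.zipWith gRep (replace.toList.drop k) ts := by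
  induction ts generalizing acc k with
  | nil => simp
  | cons e ts' ih =>
    have hk : k < replace.toList.length := by simp only [List.length_cons] at h; omega
    have hget : PySem.Str.pyGet? replace (k : Int) = some (replace.toList[k]) := by
      simp [List.getElem?_eq_getElem hk]
    have hdrop : replace.toList.drop k = replace.toList[k] :: replace.toList.drop (k + 1) :=
      (List.getElem_cons_drop hk).symm
    simp only [List.foldl_cons, hget, Option.getD_some]
    have hcast : ((k : Int) + 1) = ((k + 1 : Nat) : Int) := by push_cast; ring
    rw [hcast, ih (acc ++ [_]) (k + 1) (by simp only [List.length_cons] at h; omega)]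
    rw [hdrop, List.zipWith_cons_cons]
    simp only [gRep, List.append_assoc, List.singleton_append]

-- main correspondence: mapping the zipWith over all character tuples is exactly altGo on the suffixes
theorem prod_zip_eq_altGo (ts : List String) :
    (prodDotDash ts.length).map
        (fun t => List.zipWith gRep ((t.map String.toList).flatten) ts)
      = altGo (ts.map (fun s => PySem.Str.slice s (some 1) none)) [] := by
  induction ts with
  | nil => simp [prodDotDash, altGo]
  | cons e ts' ih =>
    simp only [List.length_cons, prodDotDash, List.flatMap_cons, List.flatMap_nil,
      List.append_nil, List.map_append, List.map_map, List.map_cons, altGo,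
      List.nil_append]
    rw [altGo_acc (ts'.map (fun s => PySem.Str.slice s (some 1) none))
          [pyStrCat (String.ofList ['.']) (PySem.Str.slice e (some 1) none)],
        altGo_acc (ts'.map (fun s => PySem.Str.slice s (some 1) none))
          [pyStrCat (String.ofList ['-']) (PySem.Str.slice e (some 1) none)], ← ih]
    simp [List.map_map, Function.comp_def, gRep]

-- ===== VERDICT (by name: the statement is the Claim_ definition above) =====
theorem morse_all_spec : Claim_equal_morse_all := by
  intro test _
  unfold Spec_morse_all morse_all morse_all_alt guesslist
  rw [PySem.List.foldl_append_singleton_eq_map]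
  simp only [List.nil_append, List.map_map]
  rw [← prod_zip_eq_altGo]
  apply List.map_congr_left
  intro t ht
  simp only [Function.comp_apply]
  have hlen : ((PySem.Str.join "" t).toList).length = test.length := by
    rw [PySem.Str.toList_join]
    simpa [joinNilFlat, List.map_map] using length_prod_chars ht
  have := inner_fold test (PySem.Str.join "" t) [] 0 (by omega)
  simp only [Nat.cast_zero, List.drop_zero, List.nil_append] at this
  rw [this]
  rw [PySem.Str.toList_join]
  simp [joinNilFlat]
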